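-- pv_equiv track=rewrite | github.com/Jeff-Lowrey/leet_code | solutions/graphs/261-graph-valid-tree.py | validTree_dfs
-- ===== SOURCE A (Python) =====
-- from collections import defaultdict, deque
-- from typing import List, Optional, Dict, Tuple
--
-- def validTree_dfs(n: int, edges: List[List[int]]) -> bool:
--     """
--     Alternative implementation using DFS.
--
--     Args:
--         n: Number of nodes (labeled from 0 to n-1)
--         edges: List of edges, where each edge is [node1, node2]
--
--     Returns:
--         bool: True if the graph is a valid tree, False otherwise
--     """
--     if len(edges) != n - 1:
--         return False
--
--     # Create adjacency list
--     adj_list = defaultdict(list)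
--     for u, v in edges:
--         adj_list[u].append(v)
--         adj_list[v].append(u)
--
--     visited = set()
--
--     def dfs(node: int, parent: int) -> bool:
--         visited.add(node)
--
--         for neighbor in adj_list[node]:
--             if neighbor == parent:
--                 continue
--             if neighbor in visited:
--                 return False
--             if not dfs(neighbor, node):
--                 return False
--         return True
--
--     return dfs(0, -1) and len(visited) == n
-- ===== SOURCE B (Python) =====
-- from collections import defaultdict, deque
-- from typing import List
--
-- def validTree_dfs(n: int, edges: List[List[int]]) -> bool:
--     """A graph on n nodes is a valid tree iff it has exactly n-1 edges and is
--     connected; with the edge-count guard in place, a plain BFS reachability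
--     count replaces the recursive DFS and its cycle check entirely."""
--     if len(edges) != n - 1:
--         return False
--
--     adj = defaultdict(list)
--     for u, v in edges:
--         adj[u].append(v)
--         adj[v].append(u)
--
--     seen = {0}
--     queue = deque([0])
--     while queue:
--         node = queue.popleft()
--         for neighbor in adj[node]:
--             if neighbor not in seen:
--                 seen.add(neighbor)
--                 queue.append(neighbor)
--
--     return len(seen) == n
-- ===== Notes on version B (the rewrite author's own statement) =====
-- stated objective: simpler
-- what changed: A's recursive DFS with an explicit back-edge cycle check plus a visited-count test is replaced by an iterative BFS that only counts the vertices reachable from 0: under the guard len(edges) == n-1 the graph is a valid tree iff it is connected, so the cycle check disappears entirely.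
-- outside the precondition, e.g. on validTree_dfs(3, [[0], [1]]): A raises ValueError, B raises ValueError; on validTree_dfs(2, [[0, -1]]): A returns False, B returns True; on validTree_dfs(3, [[0, 5], [5, 2]]): A returns True, B returns True
import Mathlib
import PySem

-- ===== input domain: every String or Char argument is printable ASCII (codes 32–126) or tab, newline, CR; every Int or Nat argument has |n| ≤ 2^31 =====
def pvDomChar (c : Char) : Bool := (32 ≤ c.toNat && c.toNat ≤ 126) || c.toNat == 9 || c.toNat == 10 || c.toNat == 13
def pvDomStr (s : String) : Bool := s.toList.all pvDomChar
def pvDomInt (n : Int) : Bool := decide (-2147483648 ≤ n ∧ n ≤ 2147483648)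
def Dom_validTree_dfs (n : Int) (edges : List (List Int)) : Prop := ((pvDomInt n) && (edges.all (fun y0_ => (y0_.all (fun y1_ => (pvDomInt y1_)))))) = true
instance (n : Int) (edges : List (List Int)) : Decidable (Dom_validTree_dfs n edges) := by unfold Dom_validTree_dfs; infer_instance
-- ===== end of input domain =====

-- B replaces A's recursive DFS + cycle check by a plain BFS reachability count: under the
-- guard len(edges) == n-1, "valid tree" is exactly "all n nodes reachable from 0" (objective:
-- simpler).  Equality of the two return values is proved below for well-formed inputs (Pre_).

-- ===== PORT A =====
def pvAdjA (edges : List (List Int)) : PySem.Dict Int (List Int) :=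
  edges.foldl (fun d e =>
    match e with
    | [u, v] => (d.modify u [] (· ++ [v])).modify v [] (· ++ [u])
    | _ => d) PySem.Dict.empty   -- Python raises ValueError on a non-2-element edge; Pre_ excludes that

mutual
-- the recursive dfs; fuel only makes the recursion total, 2*len(edges)+2 never runs out (depth
-- is bounded by the number of distinct labels + 1, since every nested call grows `vis`)
def dfsA (adj : PySem.Dict Int (List Int)) : Nat → Int → Int → PySem.Set Int → Bool × PySem.Set Int
  | 0, _, _, vis => (false, vis)
  | fuel + 1, node, parent, vis =>
    dfsGoA adj fuel (adj.getD node []) node parent (PySem.Set.add vis node)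
termination_by fuel _ _ _ => (fuel, 0)

-- the `for neighbor in adj_list[node]` loop with its early returns
def dfsGoA (adj : PySem.Dict Int (List Int)) : Nat → List Int → Int → Int → PySem.Set Int → Bool × PySem.Set Int
  | _, [], _, _, vis => (true, vis)
  | fuel, nb :: rest, node, parent, vis =>
    if nb = parent then dfsGoA adj fuel rest node parent vis
    else if PySem.Set.contains vis nb then (false, vis)
    else
      match dfsA adj fuel nb node vis with
      | (true, vis') => dfsGoA adj fuel rest node parent vis'
      | r => r
termination_by fuel l _ _ _ => (fuel, l.length + 1)
end

def validTree_dfs (n : Int) (edges : List (List Int)) : Bool :=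
  if (edges.length : Int) ≠ n - 1 then false
  else
    let adj := pvAdjA edges
    let res := dfsA adj (2 * edges.length + 2) 0 (-1) PySem.Set.empty
    res.1 && decide ((res.2.length : Int) = n)

-- ===== PORT B =====
-- the BFS worklist loop; fuel only makes it total (total pops ≤ 1 + total insertions in `seen`)
def bfsB (adj : PySem.Dict Int (List Int)) : Nat → List Int → PySem.Set Int → PySem.Set Int
  | 0, _, seen => seen
  | _ + 1, [], seen => seen
  | fuel + 1, node :: queue, seen =>
    let st := (adj.getD node []).foldl
      (fun (qs : List Int × PySem.Set Int) nb =>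
        if PySem.Set.contains qs.2 nb then qs else (qs.1 ++ [nb], PySem.Set.add qs.2 nb))
      (queue, seen)
    bfsB adj fuel st.1 st.2

def validTree_dfs_alt (n : Int) (edges : List (List Int)) : Bool :=
  if (edges.length : Int) ≠ n - 1 then false
  else
    let adj := edges.foldl (fun d e =>
      match e with
      | [u, v] => (d.modify u [] (· ++ [v])).modify v [] (· ++ [u])
      | _ => d) PySem.Dict.empty   -- same ValueError remark as in A's build
    let seen := bfsB adj (2 * edges.length + 2) [0] (PySem.Set.ofList [0])
    decide ((seen.length : Int) = n)

-- ===== PRECONDITION & SPEC =====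
-- When len(edges) ≠ n-1 both programs return False before looking at edges, so nothing is
-- excluded there.  Under the guard, Pre_ keeps only well-formed inputs: every edge a 2-element
-- list with labels in [0, n) — on other edges A raises ValueError while unpacking, and
-- out-of-range labels are invalid inputs (nodes are 0..n-1) on which A's accidental behaviour
-- (the sentinel parent -1 colliding with a label, defaultdict growing the vertex set) and B's
-- differ; see the cited examples in the claim.
def Pre_validTree_dfs (n : Int) (edges : List (List Int)) : Prop :=
  (edges.length : Int) = n - 1 →
    ∀ e ∈ edges, e.length = 2 ∧ ∀ x ∈ e, 0 ≤ x ∧ x < n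
instance (n : Int) (edges : List (List Int)) : Decidable (Pre_validTree_dfs n edges) := by
  unfold Pre_validTree_dfs; infer_instance

def pvWitness_validTree_dfs : Int × List (List Int) := (3, [[0, 1], [1, 2]])

def Spec_validTree_dfs (n : Int) (edges : List (List Int)) (out : Bool) : Prop := out = validTree_dfs_alt n edges
instance (n : Int) (edges : List (List Int)) (out : Bool) : Decidable (Spec_validTree_dfs n edges out) := by unfold Spec_validTree_dfs; infer_instance

-- ===== CLAIM (what is proved, stated in full; the proofs are below) =====
def Claim_equal_validTree_dfs : Prop := ∀ (n : Int) (edges : List (List Int)), Dom_validTree_dfs n edges → Pre_validTree_dfs n edges → Spec_validTree_dfs n edges (validTree_dfs n edges)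

-- ===== LEMMAS AND PROOFS =====

-- === graph model ===
def pvAdjRel (P : List (Int × Int)) (a b : Int) : Prop := (a, b) ∈ P ∨ (b, a) ∈ P

def pvReach (P : List (Int × Int)) (a b : Int) : Prop := Relation.ReflTransGen (pvAdjRel P) a b

theorem pvAdjRel_symm {P : List (Int × Int)} {a b : Int} (h : pvAdjRel P a b) : pvAdjRel P b a :=
  h.symm

theorem pvReach_refl {P : List (Int × Int)} {a : Int} : pvReach P a a := Relation.ReflTransGen.refl

theorem pvReach_symm {P : List (Int × Int)} {a b : Int} (h : pvReach P a b) : pvReach P b a :=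
  Relation.ReflTransGen.symmetric (fun _ _ hh => pvAdjRel_symm hh) h

theorem pvReach_trans {P : List (Int × Int)} {a b c : Int} (h1 : pvReach P a b) (h2 : pvReach P b c) :
    pvReach P a c := Relation.ReflTransGen.trans h1 h2

theorem pvReach_single {P : List (Int × Int)} {a b : Int} (h : pvAdjRel P a b) : pvReach P a b :=
  Relation.ReflTransGen.single h

theorem pvReach_transfer {P Q : List (Int × Int)} (h : ∀ a b, pvAdjRel P a b → pvReach Q a b)
    {a b : Int} (hr : pvReach P a b) : pvReach Q a b := by
  have h2 := Relation.ReflTransGen.mono h hr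
  have h3 : Relation.ReflTransGen (Relation.ReflTransGen (pvAdjRel Q)) a b := h2
  rwa [Relation.reflTransGen_idem] at h3

theorem pvReach_nil {a b : Int} (h : pvReach [] a b) : a = b := by
  induction h with
  | refl => rfl
  | tail _ hadj ih => cases hadj <;> simp_all

theorem pvReach_cons_of {e : Int × Int} {P : List (Int × Int)} {a b : Int} (h : pvReach P a b) :
    pvReach (e :: P) a b :=
  pvReach_transfer (fun _ _ hh => pvReach_single (by rcases hh with h' | h' <;> [left; right] <;> simp [h'])) h

theorem pvReach_cons_decomp {e : Int × Int} {P : List (Int × Int)} {a b : Int}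
    (h : pvReach (e :: P) a b) :
    pvReach P a b ∨ (pvReach P a e.1 ∧ pvReach P e.2 b) ∨ (pvReach P a e.2 ∧ pvReach P e.1 b) := by
  induction h with
  | refl => exact Or.inl Relation.ReflTransGen.refl
  | @tail y c _ hadj ih =>
    by_cases hP : pvAdjRel P y c
    · rcases ih with ih | ⟨h1, h2⟩ | ⟨h1, h2⟩
      · exact Or.inl (ih.tail hP)
      · exact Or.inr (Or.inl ⟨h1, h2.tail hP⟩)
      · exact Or.inr (Or.inr ⟨h1, h2.tail hP⟩)
    · have he : (y, c) = e ∨ (c, y) = e := by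
        rcases hadj with h' | h' <;> simp only [List.mem_cons] at h' <;>
          rcases h' with h' | h' <;> first
            | exact Or.inl h' | exact Or.inr h'
            | exact absurd (Or.inl h') hP | exact absurd (Or.inr h') hP
      rcases he with he | he
      · have h1 : e.1 = y := by rw [← he]
        have h2 : e.2 = c := by rw [← he]
        subst h1; subst h2
        rcases ih with ih | ⟨ha, _⟩ | ⟨ha, _⟩
        · exact Or.inr (Or.inl ⟨ih, Relation.ReflTransGen.refl⟩)
        · exact Or.inr (Or.inl ⟨ha, Relation.ReflTransGen.refl⟩)
        · exact Or.inl ha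
      · have h1 : e.1 = c := by rw [← he]
        have h2 : e.2 = y := by rw [← he]
        subst h1; subst h2
        rcases ih with ih | ⟨ha, _⟩ | ⟨ha, _⟩
        · exact Or.inr (Or.inr ⟨ih, Relation.ReflTransGen.refl⟩)
        · exact Or.inl ha
        · exact Or.inr (Or.inr ⟨ha, Relation.ReflTransGen.refl⟩)

-- === class representatives and the component-counting bound ===
noncomputable def pvClass (P : List (Int × Int)) (S : Finset Int) (x : Int) : Finset Int :=
  @Finset.filter _ (fun y => pvReach P x y) (fun _ => Classical.propDecidable _) S

noncomputable def pvRep (P : List (Int × Int)) (S : Finset Int) (x : Int) : Int :=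
  if h : (pvClass P S x).Nonempty then (pvClass P S x).min' h else x

theorem pvClass_eq_of_reach {P : List (Int × Int)} {S : Finset Int} {a b : Int}
    (h : pvReach P a b) : pvClass P S a = pvClass P S b := by
  unfold pvClass
  ext y
  simp only [Finset.mem_filter]
  exact and_congr_right fun _ =>
    ⟨fun hy => pvReach_trans (pvReach_symm h) hy, fun hy => pvReach_trans h hy⟩

theorem pvRep_eq_of_reach {P : List (Int × Int)} {S : Finset Int} {a b : Int}
    (ha : a ∈ S) (h : pvReach P a b) : pvRep P S a = pvRep P S b := by
  have hcls := pvClass_eq_of_reach (S := S) h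
  have hne : (pvClass P S a).Nonempty := ⟨a, by unfold pvClass; simp [Finset.mem_filter, ha, pvReach_refl]⟩
  have hne' : (pvClass P S b).Nonempty := hcls ▸ hne
  unfold pvRep
  rw [dif_pos hne, dif_pos hne']
  congr 1

theorem pvRep_mem {P : List (Int × Int)} {S : Finset Int} {x : Int} (hx : x ∈ S) :
    pvRep P S x ∈ S ∧ pvReach P x (pvRep P S x) := by
  have hne : (pvClass P S x).Nonempty := ⟨x, by unfold pvClass; simp [Finset.mem_filter, hx, pvReach_refl]⟩
  have hmem := Finset.min'_mem _ hne
  unfold pvClass at hmem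
  simp only [Finset.mem_filter] at hmem
  unfold pvRep
  rw [dif_pos hne]
  exact hmem

theorem pvRep_self {P : List (Int × Int)} {S : Finset Int} {x y : Int} (hy : y ∈ S)
    (hxy : x = pvRep P S y) : pvRep P S x = x := by
  subst hxy
  exact (pvRep_eq_of_reach hy (pvRep_mem hy).2).symm

theorem pvRepBound (P : List (Int × Int)) (S : Finset Int) :
    S.card ≤ P.length + (S.image (pvRep P S)).card := by
  induction P with
  | nil =>
    have himg : S.image (pvRep [] S) = S := by
      have : ∀ x ∈ S, pvRep [] S x = x := by
        intro x hx
        have h := (pvRep_mem (P := []) hx).2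
        have := pvReach_nil h
        omega
      rw [Finset.image_congr (fun x hx => this x hx)]
      exact Finset.image_id
    rw [himg]; simp
  | cons e P' ih =>
    set r := pvRep P' S with hr
    set r' := pvRep (e :: P') S with hr'
    have hconst : ∀ x ∈ S, r' (r x) = r' x := by
      intro x hx
      exact (pvRep_eq_of_reach hx (pvReach_cons_of (pvRep_mem hx).2)).symm
    have himg : S.image r' = (S.image r).image r' := by
      rw [Finset.image_image]
      exact (Finset.image_congr (fun x hx => (hconst x hx).symm))
    set c1 := pvRep P' S e.1 with hc1
    -- r' is injective on (S.image r).erase c1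
    have hinj : Set.InjOn r' ((S.image r).erase c1 : Finset Int) := by
      intro a ha b hb hab
      rw [Finset.coe_erase] at ha hb
      obtain ⟨haT, hane⟩ := ha
      obtain ⟨hbT, hbne⟩ := hb
      rw [Finset.mem_coe, Finset.mem_image] at haT hbT
      simp only [Set.mem_singleton_iff] at hane hbne
      by_contra hne
      -- a, b ∈ S, fixed points of r
      obtain ⟨xa, hxa, hxar⟩ := haT
      obtain ⟨xb, hxb, hxbr⟩ := hbT
      have haS : a ∈ S := hxar ▸ (pvRep_mem hxa).1
      have hbS : b ∈ S := hxbr ▸ (pvRep_mem hxb).1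
      have hra : r a = a := pvRep_self hxa hxar.symm
      have hrb : r b = b := pvRep_self hxb hxbr.symm
      -- a ~(e::P') b
      have hreach : pvReach (e :: P') a b := by
        have h1 := (pvRep_mem (P := e :: P') haS).2
        have h2 := (pvRep_mem (P := e :: P') hbS).2
        have hab' : pvRep (e :: P') S a = pvRep (e :: P') S b := hab
        rw [hab'] at h1
        exact pvReach_trans h1 (pvReach_symm h2)
      have hnreach : ¬ pvReach P' a b := by
        intro h
        exact hne (hra ▸ hrb ▸ pvRep_eq_of_reach haS h)
      rcases pvReach_cons_decomp hreach with h | ⟨h1, h2⟩ | ⟨h1, h2⟩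
      · exact hnreach h
      · -- a ~P' e.1 : a = c1
        refine hane ?_
        have : pvRep P' S a = pvRep P' S e.1 := pvRep_eq_of_reach haS h1
        have hra' : pvRep P' S a = a := hra
        rw [← hra', this]
      · -- b ~P' e.1 (from e.1 ~ b)
        refine hbne ?_
        have : pvRep P' S b = pvRep P' S e.1 := pvRep_eq_of_reach hbS (pvReach_symm h2)
        have hrb' : pvRep P' S b = b := hrb
        rw [← hrb', this]
    calc S.card ≤ P'.length + (S.image r).card := ih
    _ ≤ P'.length + (((S.image r).erase c1).card + 1) := by
        have := Finset.pred_card_le_card_erase (s := S.image r) (a := c1)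
        omega
    _ = P'.length + 1 + (((S.image r).erase c1).image r').card := by
        rw [Finset.card_image_of_injOn hinj]; omega
    _ ≤ P'.length + 1 + ((S.image r).image r').card := by
        gcongr
        exact Finset.image_subset_image (Finset.erase_subset _ _)
    _ = (e :: P').length + (S.image r').card := by
        rw [himg, List.length_cons]

theorem pvCountBound (P : List (Int × Int)) (S : Finset Int) (r0 : Int)
    (h : ∀ x ∈ S, pvReach P r0 x) : S.card ≤ P.length + 1 := by
  rcases S.eq_empty_or_nonempty with hS | ⟨x0, hx0⟩
  · simp [hS]
  · have himg : S.image (pvRep P S) = {pvRep P S x0} := by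
      apply Finset.eq_singleton_iff_unique_mem.mpr
      constructor
      · exact Finset.mem_image_of_mem _ hx0
      · intro y hy
        obtain ⟨x, hx, hxy⟩ := Finset.mem_image.mp hy
        rw [← hxy]
        exact pvRep_eq_of_reach hx (pvReach_trans (pvReach_symm (h x hx)) (h x0 hx0))
    have := pvRepBound P S
    rw [himg] at this
    simpa using this

def pvPairs (edges : List (List Int)) : List (Int × Int) :=
  edges.filterMap (fun e => match e with | [u, v] => some (u, v) | _ => none)

def pvPartners (P : List (Int × Int)) (x : Int) : List Int :=
  P.flatMap (fun e => (if e.1 = x then [e.2] else []) ++ (if e.2 = x then [e.1] else []))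

theorem pvPartners_cons (e : Int × Int) (P : List (Int × Int)) (x : Int) :
    pvPartners (e :: P) x =
      ((if e.1 = x then [e.2] else []) ++ (if e.2 = x then [e.1] else [])) ++ pvPartners P x := by
  simp [pvPartners]

theorem pvPartners_mem {P : List (Int × Int)} {x w : Int} :
    w ∈ pvPartners P x ↔ pvAdjRel P x w := by
  simp only [pvPartners, List.mem_flatMap, List.mem_append, pvAdjRel]
  constructor
  · rintro ⟨e, he, h | h⟩ <;> split_ifs at h <;> simp_all <;> subst_vars
    · exact Or.inl he
    · exact Or.inr he
  · rintro (h | h)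
    · exact ⟨(x, w), h, by simp⟩
    · exact ⟨(w, x), h, by by_cases hwx : w = x <;> simp [hwx]⟩

-- adjacency built by the ports equals pvPartners of the parsed pairs
theorem pvAdjA_foldl (edges : List (List Int)) (x : Int) :
    ∀ d : PySem.Dict Int (List Int),
      (edges.foldl (fun d e =>
        match e with
        | [u, v] => (d.modify u [] (· ++ [v])).modify v [] (· ++ [u])
        | _ => d) d).getD x [] = d.getD x [] ++ pvPartners (pvPairs edges) x := by
  induction edges with
  | nil => intro d; simp [pvPairs, pvPartners]
  | cons e es ih =>
    intro d
    match e with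
    | [] => simpa [pvPairs] using ih d
    | [u] => simpa [pvPairs] using ih d
    | u :: v :: w :: t => simpa [pvPairs] using ih d
    | [u, v] =>
      have hp : pvPairs ([u, v] :: es) = (u, v) :: pvPairs es := by simp [pvPairs]
      rw [List.foldl_cons]
      show (es.foldl _ ((d.modify u [] (· ++ [v])).modify v [] (· ++ [u]))).getD x [] = _
      rw [ih]
      rw [hp, pvPartners_cons]
      have hmod : ((d.modify u [] (· ++ [v])).modify v [] (· ++ [u])).getD x [] =
          d.getD x [] ++ ((if u = x then [v] else []) ++ (if v = x then [u] else [])) := by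
        rw [PySem.Dict.getD_modify, PySem.Dict.getD_modify]
        by_cases hxu : x = u <;> by_cases hxv : x = v
        · subst hxu; rw [← hxv]; simp [List.append_assoc]
        · subst hxu
          have hvx : v ≠ x := fun h => hxv h.symm
          simp [hxv, hvx]
        · subst hxv
          have hux : u ≠ x := fun h => hxu h.symm
          simp [hxu, hux]
        · have hvx : v ≠ x := fun h => hxv h.symm
          have hux : u ≠ x := fun h => hxu h.symm
          simp [PySem.Dict.getD_modify, hxu, hxv, hux, hvx]
      rw [hmod, List.append_assoc]

theorem pvPartners_eq_map {P : List (Int × Int)} {x : Int}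
    (hT1 : ∀ e ∈ P, e.1 ≠ e.2) :
    pvPartners P x =
      (P.filter (fun e => decide (e.1 = x) || decide (e.2 = x))).map
        (fun e => if e.1 = x then e.2 else e.1) := by
  induction P with
  | nil => rfl
  | cons e es ih =>
    have hT1' : ∀ e' ∈ es, e'.1 ≠ e'.2 := fun e' h => hT1 e' (List.mem_cons_of_mem _ h)
    rw [pvPartners_cons, ih hT1']
    by_cases h1 : e.1 = x <;> by_cases h2 : e.2 = x
    · exact absurd (h1.trans h2.symm) (hT1 e List.mem_cons_self)
    · simp [h1, h2]
    · simp [h1, h2]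
    · simp [h1, h2]

theorem pvPartners_nodup {P : List (Int × Int)} {x : Int}
    (hT1 : ∀ e ∈ P, e.1 ≠ e.2)
    (hT2 : P.Pairwise (fun e e' => s(e.1, e.2) ≠ s(e'.1, e'.2))) :
    (pvPartners P x).Nodup := by
  rw [pvPartners_eq_map hT1]
  have hsym : ∀ e ∈ P, (e.1 = x ∨ e.2 = x) →
      s((x : Int), if e.1 = x then e.2 else e.1) = s(e.1, e.2) := by
    intro e _ he
    by_cases h1 : e.1 = x
    · simp [h1]
    · rcases he with he | he
      · exact absurd he h1
      · simp only [h1, if_false, he]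
        exact Sym2.eq_swap
  have hforall : ∀ a ∈ P, ∀ b ∈ P, a ≠ b → s(a.1, a.2) ≠ s(b.1, b.2) := by
    have hsymm : Symmetric (fun (e e' : Int × Int) => s(e.1, e.2) ≠ s(e'.1, e'.2)) :=
      fun a b h hab => h hab.symm
    intro a ha b hb hab
    exact List.Pairwise.forall hsymm hT2 ha hb hab
  have hPnd : P.Nodup := List.Pairwise.imp (fun h => by intro hab; exact h (by rw [hab])) hT2
  refine List.Nodup.map_on ?_ (List.Nodup.filter _ hPnd)
  intro a ha b hb hfab
  have ha' := List.mem_filter.mp ha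
  have hb' := List.mem_filter.mp hb
  have hca : a.1 = x ∨ a.2 = x := by
    rcases Bool.or_eq_true_iff.mp ha'.2 with h | h
    · exact Or.inl (of_decide_eq_true h)
    · exact Or.inr (of_decide_eq_true h)
  have hcb : b.1 = x ∨ b.2 = x := by
    rcases Bool.or_eq_true_iff.mp hb'.2 with h | h
    · exact Or.inl (of_decide_eq_true h)
    · exact Or.inr (of_decide_eq_true h)
  by_contra hne
  apply hforall a ha'.1 b hb'.1 hne
  rw [← hsym a ha'.1 hca, ← hsym b hb'.1 hcb, hfab]

theorem pvPairSublistSplit {α : Type} {a b : α} {l : List α} (h : [a, b].Sublist l) :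
    ∃ l1 l2 l3, l = l1 ++ a :: l2 ++ b :: l3 := by
  induction l with
  | nil => simp at h
  | cons c t ih =>
    rcases h with _ | ⟨h'⟩ | ⟨h'⟩
    case cons h' =>
      obtain ⟨l1, l2, l3, rfl⟩ := ih h'
      exact ⟨c :: l1, l2, l3, rfl⟩
    case cons₂ h' =>
      have hb : b ∈ t := h'.subset (by simp)
      obtain ⟨s', t', rfl⟩ := List.append_of_mem hb
      exact ⟨[], s', t', rfl⟩

-- removing an edge while a detour exists keeps every pvAdjRel step reachable
theorem pvDropStep {l1 l2 : List (Int × Int)} {e : Int × Int}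
    (hdet : pvReach (l1 ++ l2) e.1 e.2) :
    ∀ a b, pvAdjRel (l1 ++ e :: l2) a b → pvReach (l1 ++ l2) a b := by
  intro a b hab
  rcases hab with h | h <;> rw [List.mem_append, List.mem_cons] at h
  · rcases h with h | h | h
    · exact pvReach_single (Or.inl (List.mem_append.mpr (Or.inl h)))
    · have h1 : e.1 = a := by rw [← h]
      have h2 : e.2 = b := by rw [← h]
      rw [← h1, ← h2]; exact hdet
    · exact pvReach_single (Or.inl (List.mem_append.mpr (Or.inr h)))
  · rcases h with h | h | h
    · exact pvReach_single (Or.inr (List.mem_append.mpr (Or.inl h)))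
    · have h1 : e.1 = b := by rw [← h]
      have h2 : e.2 = a := by rw [← h]
      rw [← h1, ← h2]; exact pvReach_symm hdet
    · exact pvReach_single (Or.inr (List.mem_append.mpr (Or.inr h)))

-- the contradiction engine: a connected span of |P|+1 vertices cannot survive losing an edge
theorem pvNoDrop {P l1 l2 : List (Int × Int)} {e : Int × Int} {S : Finset Int} {r0 : Int}
    (hsplit : P = l1 ++ e :: l2)
    (hdet : pvReach (l1 ++ l2) e.1 e.2)
    (hconn : ∀ x ∈ S, pvReach P r0 x)
    (hcard : S.card = P.length + 1) : False := by
  have htrans := pvDropStep hdet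
  have hconn' : ∀ x ∈ S, pvReach (l1 ++ l2) r0 x := fun x hx =>
    pvReach_transfer (by rw [hsplit] at hconn ⊢; exact htrans) (hconn x hx)
  have := pvCountBound (l1 ++ l2) S r0 hconn'
  rw [hcard, hsplit] at this
  simp [List.length_append] at this

-- T1: no self-loops
theorem pvT1 {P : List (Int × Int)} {S : Finset Int} {r0 : Int}
    (hconn : ∀ x ∈ S, pvReach P r0 x) (hcard : S.card = P.length + 1) :
    ∀ e ∈ P, e.1 ≠ e.2 := by
  intro e he heq
  obtain ⟨l1, l2, rfl⟩ := List.append_of_mem he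
  exact pvNoDrop rfl (by rw [heq]; exact pvReach_refl) hconn hcard

-- T2: all edges have pairwise distinct endpoint sets
theorem pvT2 {P : List (Int × Int)} {S : Finset Int} {r0 : Int}
    (hconn : ∀ x ∈ S, pvReach P r0 x) (hcard : S.card = P.length + 1) :
    P.Pairwise (fun e e' => s(e.1, e.2) ≠ s(e'.1, e'.2)) := by
  rw [List.pairwise_iff_forall_sublist]
  intro e e' hsub heq
  obtain ⟨l1, l2, l3, rfl⟩ := pvPairSublistSplit hsub
  -- drop e; e' ∈ l2 ++ e' :: l3 provides the detour
  have he' : pvAdjRel (l1 ++ (l2 ++ e' :: l3)) e'.1 e'.2 := Or.inl (by simp)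
  have hdet : pvReach (l1 ++ (l2 ++ e' :: l3)) e.1 e.2 := by
    rcases Sym2.eq_iff.mp heq with ⟨h1, h2⟩ | ⟨h1, h2⟩
    · rw [h1, h2]; exact pvReach_single he'
    · rw [h1, h2]; exact pvReach_symm (pvReach_single he')
  exact pvNoDrop (by simp) hdet hconn hcard

-- T3: removing any edge disconnects its endpoints (acyclicity)
theorem pvT3 {P l1 l2 : List (Int × Int)} {e : Int × Int} {S : Finset Int} {r0 : Int}
    (hconn : ∀ x ∈ S, pvReach P r0 x) (hcard : S.card = P.length + 1)
    (hsplit : P = l1 ++ e :: l2) : ¬ pvReach (l1 ++ l2) e.1 e.2 :=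
  fun hdet => pvNoDrop hsplit hdet hconn hcard

theorem pvAdjRel_memU {P : List (Int × Int)} {U : Finset Int}
    (HPU : ∀ e ∈ P, e.1 ∈ U ∧ e.2 ∈ U) {a b : Int} (h : pvAdjRel P a b) : a ∈ U ∧ b ∈ U := by
  rcases h with h | h
  · exact ⟨(HPU _ h).1, (HPU _ h).2⟩
  · exact ⟨(HPU _ h).2, (HPU _ h).1⟩

theorem pvBfsFold (U : Finset Int) (ws : List Int) :
    ∀ (q : List Int) (s : PySem.Set Int), s.Nodup → (∀ w ∈ ws, w ∈ U) →
    ∃ new : List Int,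
      (ws.foldl (fun (qs : List Int × PySem.Set Int) nb =>
        if PySem.Set.contains qs.2 nb then qs else (qs.1 ++ [nb], PySem.Set.add qs.2 nb)) (q, s))
        = (q ++ new, s ++ new) ∧
      (s ++ new : List Int).Nodup ∧
      (∀ w ∈ ws, w ∈ s ++ new) ∧
      (∀ x ∈ new, x ∈ ws) ∧
      ((U.filter (· ∉ (s ++ new : List Int))).card + (q ++ new).length ≤
        (U.filter (· ∉ (s : List Int))).card + q.length) := by
  induction ws with
  | nil =>
    intro q s hnd _
    exact ⟨[], by simp, by simpa using hnd, by simp, by simp, by simp⟩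
  | cons w ws ih =>
    intro q s hnd hU
    rw [List.foldl_cons]
    by_cases hw : w ∈ s
    · have hc : PySem.Set.contains s w = true := by
        rw [PySem.Set.contains_iff]; exact hw
      rw [if_pos hc]
      obtain ⟨new, heq, h1, h2, h3, h4⟩ := ih q s hnd (fun x hx => hU x (List.mem_cons_of_mem _ hx))
      exact ⟨new, heq, h1,
        fun x hx => by
          rcases List.mem_cons.mp hx with rfl | hx
          · exact List.mem_append.mpr (Or.inl hw)
          · exact h2 x hx,
        fun x hx => List.mem_cons_of_mem _ (h3 x hx), h4⟩
    · have hc : ¬ PySem.Set.contains s w = true := by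
        rw [PySem.Set.contains_iff]; exact hw
      rw [if_neg hc]
      have hadd : PySem.Set.add s w = s ++ [w] := PySem.Set.add_of_not_mem hw
      rw [hadd]
      have hnd' : (s ++ [w] : List Int).Nodup := by
        rw [List.nodup_append]
        refine ⟨hnd, List.nodup_singleton w, ?_⟩
        intro a ha b hb
        rw [List.mem_singleton] at hb
        subst hb
        exact fun hab => hw (hab ▸ ha)
      obtain ⟨new, heq, h1, h2, h3, h4⟩ := ih (q ++ [w]) (s ++ [w]) hnd'
        (fun x hx => hU x (List.mem_cons_of_mem _ hx))
      refine ⟨w :: new, ?_, ?_, ?_, ?_, ?_⟩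
      · rw [heq]; simp
      · simpa using h1
      · intro x hx
        rcases List.mem_cons.mp hx with rfl | hx
        · have := h2 -- w ∈ s++[w] ⊆ result? use h1-side: w ∈ s++[w]++new
          simp
        · have := h2 x hx
          simpa using this
      · intro x hx
        rcases List.mem_cons.mp hx with rfl | hx
        · exact List.mem_cons_self
        · exact List.mem_cons_of_mem _ (h3 x hx)
      · -- card accounting
        have hwU : w ∈ U := hU w List.mem_cons_self
        have hsub : U.filter (· ∉ ((s ++ [w] : List Int))) ⊂ U.filter (· ∉ (s : List Int)) := by
          constructor
          · intro x hx
            rw [Finset.mem_filter] at hx ⊢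
            refine ⟨hx.1, fun hxs => hx.2 (by simp [hxs])⟩
          · intro hsup
            have hwf : w ∈ U.filter (· ∉ (s : List Int)) := by
              rw [Finset.mem_filter]; exact ⟨hwU, hw⟩
            have := hsup hwf
            rw [Finset.mem_filter] at this
            exact this.2 (by simp)
        have hcard := Finset.card_lt_card hsub
        have h4' := h4
        simp only [List.append_assoc, List.singleton_append, List.length_append,
          List.length_cons, List.length_nil] at h4' ⊢
        omega
  
theorem pvBfsMain (adj : PySem.Dict Int (List Int)) (P : List (Int × Int)) (U : Finset Int) (r0 : Int)
    (Hadj : ∀ y, adj.getD y [] = pvPartners P y)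
    (HPU : ∀ e ∈ P, e.1 ∈ U ∧ e.2 ∈ U) :
    ∀ (fuel : Nat) (queue : List Int) (seen : PySem.Set Int),
    (U.filter (· ∉ (seen : List Int))).card + queue.length < fuel →
    (∀ x ∈ queue, x ∈ seen) →
    (seen : List Int).Nodup →
    (∀ x ∈ seen, pvReach P r0 x) →
    (∀ x ∈ seen, x ∉ queue → ∀ w, pvAdjRel P x w → w ∈ seen) →
    (bfsB adj fuel queue seen).Nodup ∧
    (∀ x ∈ seen, x ∈ bfsB adj fuel queue seen) ∧
    (∀ x ∈ bfsB adj fuel queue seen, pvReach P r0 x) ∧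
    (∀ x ∈ bfsB adj fuel queue seen, ∀ w, pvAdjRel P x w → w ∈ bfsB adj fuel queue seen) := by
  intro fuel
  induction fuel with
  | zero => intro queue seen Hf; omega
  | succ fuel ih =>
    intro queue seen Hf Hq Hnd Hsound Hclosed
    match queue with
    | [] =>
      refine ⟨Hnd, fun x hx => hx, Hsound, fun x hx w hw => Hclosed x hx (by simp) w hw⟩
    | node :: rest =>
      have hnodeSeen : node ∈ seen := Hq node List.mem_cons_self
      have hwsU : ∀ w ∈ adj.getD node [], w ∈ U := by
        intro w hw
        rw [Hadj] at hw
        exact (pvAdjRel_memU HPU (pvPartners_mem.mp hw)).2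
      obtain ⟨new, heq, hnd', hws, hnew, hcard⟩ := pvBfsFold U (adj.getD node []) rest seen Hnd hwsU
      rw [show bfsB adj (fuel+1) (node :: rest) seen = bfsB adj fuel (rest ++ new) (seen ++ new) by
        rw [bfsB]; simp only [heq]]
      have hreachNew : ∀ x ∈ (seen ++ new : List Int), pvReach P r0 x := by
        intro x hx
        rcases List.mem_append.mp hx with hx | hx
        · exact Hsound x hx
        · have hadj : pvAdjRel P node x := pvPartners_mem.mp (by rw [← Hadj]; exact hnew x hx)
          exact pvReach_trans (Hsound node hnodeSeen) (pvReach_single hadj)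
      have := ih (rest ++ new) (seen ++ new)
        (by simp only [List.length_cons] at Hf; omega)
        (by intro x hx
            rcases List.mem_append.mp hx with hx | hx
            · exact List.mem_append.mpr (Or.inl (Hq x (List.mem_cons_of_mem _ hx)))
            · exact List.mem_append.mpr (Or.inr hx))
        hnd' hreachNew
        (by intro x hx hxq w hw
            rcases List.mem_append.mp hx with hxs | hxn
            · by_cases hxnode : x = node
              · subst hxnode
                exact hws w (by rw [Hadj]; exact pvPartners_mem.mpr hw)
              · have hxrest : x ∉ node :: rest := by
                  intro hmem
                  rcases List.mem_cons.mp hmem with h | h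
                  · exact hxnode h
                  · exact hxq (List.mem_append.mpr (Or.inl h))
                exact List.mem_append.mpr (Or.inl (Hclosed x hxs hxrest w hw))
            · exact absurd (List.mem_append.mpr (Or.inr hxn)) hxq)
      refine ⟨this.1, fun x hx => this.2.1 x (List.mem_append.mpr (Or.inl hx)), this.2.2.1, this.2.2.2⟩

theorem pvDfsSound (adj : PySem.Dict Int (List Int)) (P : List (Int × Int))
    (Hadj : ∀ y, adj.getD y [] = pvPartners P y) :
    ∀ fuel (node parent : Int) (vis : PySem.Set Int),
    (vis : List Int).Nodup → node ∉ vis →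
    ∃ new : List Int,
      (dfsA adj fuel node parent vis).2 = vis ++ new ∧
      (vis ++ new : List Int).Nodup ∧
      (∀ u ∈ new, pvReach P node u) ∧
      ((dfsA adj fuel node parent vis).1 = true →
        node ∈ new ∧
        (∀ w, pvAdjRel P node w → w ∈ vis ++ new ∨ w = parent) ∧
        (∀ u ∈ new, u ≠ node → ∀ w, pvAdjRel P u w → w ∈ vis ++ new)) := by
  intro fuel
  induction fuel with
  | zero =>
    intro node parent vis hnd hnode
    refine ⟨[], by simp [dfsA], by simpa using hnd, by simp, by simp [dfsA]⟩
  | succ fuel ih =>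
    -- the loop lemma at this fuel
    have go : ∀ (l : List Int) (node parent : Int) (vis : PySem.Set Int),
        (vis : List Int).Nodup → node ∈ vis →
        (∀ w ∈ l, pvAdjRel P node w) →
        ∃ new : List Int,
          (dfsGoA adj fuel l node parent vis).2 = vis ++ new ∧
          (vis ++ new : List Int).Nodup ∧
          (∀ u ∈ new, pvReach P node u) ∧
          ((dfsGoA adj fuel l node parent vis).1 = true →
            (∀ w ∈ l, w ∈ vis ++ new ∨ w = parent) ∧
            (∀ u ∈ new, ∀ w, pvAdjRel P u w → w ∈ vis ++ new)) := by
      intro l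
      induction l with
      | nil =>
        intro node parent vis hnd hnode _
        exact ⟨[], by simp [dfsGoA], by simpa using hnd, by simp, by simp⟩
      | cons nb rest ihl =>
        intro node parent vis hnd hnode hl
        by_cases hp : nb = parent
        · rw [show dfsGoA adj fuel (nb :: rest) node parent vis
              = dfsGoA adj fuel rest node parent vis by rw [dfsGoA, if_pos hp]]
          obtain ⟨new, h1, h2, h3, h4⟩ := ihl node parent vis hnd hnode
            (fun w hw => hl w (List.mem_cons_of_mem _ hw))
          refine ⟨new, h1, h2, h3, fun ht => ?_⟩
          obtain ⟨h5, h6⟩ := h4 ht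
          refine ⟨fun w hw => ?_, h6⟩
          rcases List.mem_cons.mp hw with rfl | hw
          · exact Or.inr hp
          · exact h5 w hw
        · by_cases hv : nb ∈ vis
          · have hc : PySem.Set.contains vis nb = true := (PySem.Set.contains_iff vis nb).mpr hv
            rw [show dfsGoA adj fuel (nb :: rest) node parent vis = (false, vis) by
              rw [dfsGoA, if_neg hp, if_pos hc]]
            exact ⟨[], by simp, by simpa using hnd, by simp, by simp⟩
          · have hc : ¬ PySem.Set.contains vis nb = true := by
              rw [PySem.Set.contains_iff]; exact hv
            obtain ⟨new1, k1, k2, k3, k4⟩ := ih nb node vis hnd hv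
            rcases hres : dfsA adj fuel nb node vis with ⟨ok, vis1⟩
            rw [hres] at k1 k4
            simp only at k1 k4
            subst k1
            match ok, k4 with
            | false, _ =>
              rw [show dfsGoA adj fuel (nb :: rest) node parent vis = (false, vis ++ new1) by
                rw [dfsGoA, if_neg hp, if_neg hc, hres]]
              refine ⟨new1, by simp, k2, ?_, by simp⟩
              intro u hu
              exact pvReach_trans (pvReach_single (hl nb List.mem_cons_self)) (k3 u hu)
            | true, k4 =>
              obtain ⟨k5, k6, k7⟩ := k4 rfl
              rw [show dfsGoA adj fuel (nb :: rest) node parent vis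
                  = dfsGoA adj fuel rest node parent (vis ++ new1) by
                rw [dfsGoA, if_neg hp, if_neg hc, hres]]
              obtain ⟨new2, h1, h2, h3, h4⟩ := ihl node parent (vis ++ new1) k2
                (List.mem_append.mpr (Or.inl hnode))
                (fun w hw => hl w (List.mem_cons_of_mem _ hw))
              rw [List.append_assoc] at h1 h2
              refine ⟨new1 ++ new2, h1, h2, ?_, fun ht => ?_⟩
              · intro u hu
                rcases List.mem_append.mp hu with hu | hu
                · exact pvReach_trans (pvReach_single (hl nb List.mem_cons_self)) (k3 u hu)
                · exact h3 u hu
              · obtain ⟨h5, h6⟩ := h4 ht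
                constructor
                · intro w hw
                  rcases List.mem_cons.mp hw with rfl | hw
                  · left
                    simp only [← List.append_assoc]
                    exact List.mem_append.mpr (Or.inl (List.mem_append.mpr (Or.inr k5)))
                  · rcases h5 w hw with h | h
                    · left
                      simp only [← List.append_assoc]
                      exact h
                    · exact Or.inr h
                · intro u hu w hw
                  simp only [← List.append_assoc]
                  rcases List.mem_append.mp hu with hu | hu
                  · by_cases hun : u = nb
                    · subst hun
                      rcases k6 w hw with h | h
                      · exact List.mem_append.mpr (Or.inl h)
                      · subst h
                        exact List.mem_append.mpr (Or.inl (List.mem_append.mpr (Or.inl hnode)))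
                    · have := k7 u hu hun w hw
                      exact List.mem_append.mpr (Or.inl this)
                  · exact h6 u hu w hw
    -- now the dfs statement at fuel+1
    intro node parent vis hnd hnode
    have hadd : PySem.Set.add vis node = vis ++ [node] := PySem.Set.add_of_not_mem hnode
    have hnd1 : (vis ++ [node] : List Int).Nodup := by
      rw [List.nodup_append]
      refine ⟨hnd, List.nodup_singleton node, ?_⟩
      intro a ha b hb
      rw [List.mem_singleton] at hb
      subst hb
      exact fun hab => hnode (hab ▸ ha)
    have hl : ∀ w ∈ adj.getD node [], pvAdjRel P node w := by
      intro w hw; rw [Hadj] at hw; exact pvPartners_mem.mp hw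
    rw [show dfsA adj (fuel+1) node parent vis
        = dfsGoA adj fuel (adj.getD node []) node parent (vis ++ [node]) by
      rw [dfsA, hadd]]
    obtain ⟨new, h1, h2, h3, h4⟩ := go (adj.getD node []) node parent (vis ++ [node]) hnd1
      (List.mem_append.mpr (Or.inr (List.mem_singleton_self node))) hl
    rw [List.append_assoc] at h1 h2
    refine ⟨node :: new, h1, h2, ?_, fun ht => ?_⟩
    · intro u hu
      rcases List.mem_cons.mp hu with rfl | hu
      · exact pvReach_refl
      · exact h3 u hu
    · obtain ⟨h5, h6⟩ := h4 ht
      refine ⟨List.mem_cons_self, ?_, ?_⟩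
      · intro w hw
        have := h5 w (by rw [Hadj]; exact pvPartners_mem.mpr hw)
        rcases this with h | h
        · left
          simp only [List.append_assoc, List.singleton_append] at h ⊢
          exact h
        · exact Or.inr h
      · intro u hu hun w hw
        have hu' : u ∈ new := by
          rcases List.mem_cons.mp hu with rfl | hu
          · exact absurd rfl hun
          · exact hu
        have := h6 u hu' w hw
        simp only [List.append_assoc, List.singleton_append] at this ⊢
        exact this

def pvParInv (P : List (Int × Int)) (vis : List Int) (par : Int → Int) : Prop :=
  ∀ i (hi : i < vis.length), 0 < i →
    par vis[i] ∈ vis.take i ∧ pvAdjRel P (par vis[i]) vis[i]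

theorem pvAdjDrop {P l1 l2 : List (Int × Int)} {e : Int × Int} {a b : Int}
    (hsplit : P = l1 ++ e :: l2) (h : pvAdjRel P a b) (hne : s(a, b) ≠ s(e.1, e.2)) :
    pvAdjRel (l1 ++ l2) a b := by
  rcases h with h | h <;> rw [hsplit, List.mem_append, List.mem_cons] at h
  · rcases h with h | h | h
    · exact Or.inl (List.mem_append.mpr (Or.inl h))
    · exact absurd (by rw [← h]) hne
    · exact Or.inl (List.mem_append.mpr (Or.inr h))
  · rcases h with h | h | h
    · exact Or.inr (List.mem_append.mpr (Or.inl h))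
    · refine absurd ?_ hne
      rw [← h]
      exact Sym2.eq_swap
    · exact Or.inr (List.mem_append.mpr (Or.inr h))

theorem pvParChain {Q : List (Int × Int)} {vis : List Int} {par : Int → Int}
    (h : ∀ i (hi : i < vis.length), 0 < i →
      par vis[i] ∈ vis.take i ∧ pvAdjRel Q (par vis[i]) vis[i])
    (h0 : 0 < vis.length) :
    ∀ i (hi : i < vis.length), pvReach Q (vis[0]'h0) vis[i] := by
  intro i
  induction i using Nat.strong_induction_on with
  | _ i ih =>
    intro hi
    rcases Nat.eq_zero_or_pos i with rfl | hpos
    · exact pvReach_refl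
    · obtain ⟨hmem, hadj⟩ := h i hi hpos
      obtain ⟨j, hj, hvj⟩ := List.mem_iff_getElem.mp hmem
      have hji : j < i := by
        rw [List.length_take] at hj
        omega
      have hjlen : j < vis.length := by
        rw [List.length_take] at hj
        omega
      have hget : (vis.take i)[j]'hj = vis[j]'hjlen := List.getElem_take
      rw [hget] at hvj
      exact (ih j hji hjlen).tail (hvj ▸ hadj)

theorem pvNoBackEdge {P : List (Int × Int)}
    (HT1 : ∀ e ∈ P, e.1 ≠ e.2)
    (HT3 : ∀ l1 (e : Int × Int) l2, P = l1 ++ e :: l2 → ¬ pvReach (l1 ++ l2) e.1 e.2)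
    {vis : List Int} {par : Int → Int} {node nb : Int}
    (hparinv : pvParInv P vis par)
    (hnode : node ∈ vis) (hnb : nb ∈ vis)
    (hadj : pvAdjRel P node nb)
    (hnbpar : ∀ i (hi : i < vis.length), 0 < i → vis[i] = nb → par nb ≠ node)
    (hnodepar : ∀ i (hi : i < vis.length), 0 < i → vis[i] = node → par node ≠ nb) :
    False := by
  have hnnb : node ≠ nb := by
    rcases hadj with h | h
    · exact HT1 _ h
    · exact (HT1 _ h).symm
  obtain ⟨e, he, hesym⟩ : ∃ e ∈ P, s(e.1, e.2) = s(node, nb) := by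
    rcases hadj with h | h
    · exact ⟨(node, nb), h, rfl⟩
    · exact ⟨(nb, node), h, Sym2.eq_swap⟩
  obtain ⟨l1, l2, hsplit⟩ := List.append_of_mem he
  have hQadj : ∀ i (hi : i < vis.length), 0 < i →
      par vis[i] ∈ vis.take i ∧ pvAdjRel (l1 ++ l2) (par vis[i]) vis[i] := by
    intro i hi h0
    obtain ⟨hmem, hpair⟩ := hparinv i hi h0
    refine ⟨hmem, pvAdjDrop hsplit hpair ?_⟩
    rw [hesym]
    intro heq
    rcases Sym2.eq_iff.mp heq with ⟨h1, h2⟩ | ⟨h1, h2⟩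
    · rw [h2] at h1
      exact hnbpar i hi h0 h2 h1
    · rw [h2] at h1
      exact hnodepar i hi h0 h2 h1
  have h0 : 0 < vis.length := List.length_pos_of_mem hnode
  have hchain := pvParChain hQadj h0
  obtain ⟨i, hi, hvi⟩ := List.mem_iff_getElem.mp hnode
  obtain ⟨j, hj, hvj⟩ := List.mem_iff_getElem.mp hnb
  have hreach : pvReach (l1 ++ l2) node nb :=
    pvReach_trans (pvReach_symm (hvi ▸ hchain i hi)) (hvj ▸ hchain j hj)
  apply HT3 l1 e l2 hsplit
  rcases Sym2.eq_iff.mp hesym with ⟨h1, h2⟩ | ⟨h1, h2⟩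
  · rw [h1, h2]; exact hreach
  · rw [h1, h2]; exact pvReach_symm hreach

theorem pvNodupDisj {l1 l2 : List Int} (h : (l1 ++ l2).Nodup) : ∀ x ∈ l2, x ∉ l1 := by
  rw [List.nodup_append] at h
  intro x hx hxv
  exact h.2.2 x hxv x hx rfl

theorem pvDfsMain (adj : PySem.Dict Int (List Int)) (P : List (Int × Int)) (U : Finset Int)
    (Hadj : ∀ y, adj.getD y [] = pvPartners P y)
    (HPU : ∀ e ∈ P, e.1 ∈ U ∧ e.2 ∈ U)
    (HT1 : ∀ e ∈ P, e.1 ≠ e.2)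
    (HT2 : P.Pairwise (fun e e' => s(e.1, e.2) ≠ s(e'.1, e'.2)))
    (HT3 : ∀ l1 (e : Int × Int) l2, P = l1 ++ e :: l2 → ¬ pvReach (l1 ++ l2) e.1 e.2) :
    ∀ (fuel : Nat) (node parent : Int) (vis : List Int) (par : Int → Int),
    (U.filter (· ∉ vis)).card < fuel →
    node ∈ U → node ∉ vis → (∀ x ∈ vis, x ∈ U) → vis.Nodup →
    pvParInv P vis par →
    ((parent ∈ vis ∧ pvAdjRel P parent node) ∨ (vis = [] ∧ ∀ w, pvAdjRel P node w → w ≠ parent)) →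
    ∃ (new : List Int) (par' : Int → Int),
      dfsA adj fuel node parent vis = (true, vis ++ new) ∧
      node ∈ new ∧
      (vis ++ new : List Int).Nodup ∧ (∀ x ∈ new, x ∈ U) ∧
      pvParInv P (vis ++ new) par' ∧
      (∀ x, x ∉ new → par' x = par x) ∧
      par' node = parent ∧
      (∀ u ∈ new, u ≠ node → par' u ∈ new) := by
  intro fuel
  induction fuel with
  | zero =>
    intro node parent vis par Hf
    omega
  | succ fuel ih =>
    have go : ∀ (l : List Int) (node parent : Int) (vis : List Int) (par : Int → Int) (pre : List Int),
        (U.filter (· ∉ vis)).card < fuel →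
        node ∈ vis → (∀ x ∈ vis, x ∈ U) → vis.Nodup →
        pvParInv P vis par →
        pvPartners P node = pre ++ l →
        (∀ i (hi : i < vis.length), 0 < i → vis[i] ∈ l → par vis[i] ≠ node) →
        (par node = parent ∨ vis.head? = some node) →
        ∃ (new : List Int) (par' : Int → Int),
          dfsGoA adj fuel l node parent vis = (true, vis ++ new) ∧
          (vis ++ new : List Int).Nodup ∧ (∀ x ∈ new, x ∈ U) ∧
          pvParInv P (vis ++ new) par' ∧
          (∀ x, x ∉ new → par' x = par x) ∧
          (∀ u ∈ new, par' u = node ∨ par' u ∈ new) := by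
      intro l
      induction l with
      | nil =>
        intro node parent vis par pre Hf hnode hvU hnd hparinv hpre hskip hnp
        exact ⟨[], par, by simp [dfsGoA], by simpa using hnd, by simp,
          by simpa using hparinv, fun x _ => rfl, by simp⟩
      | cons nb rest ihl =>
        intro node parent vis par pre Hf hnode hvU hnd hparinv hpre hskip hnp
        have hnbmem : nb ∈ pvPartners P node := by
          rw [hpre]
          exact List.mem_append.mpr (Or.inr List.mem_cons_self)
        have hadjnb : pvAdjRel P node nb := pvPartners_mem.mp hnbmem
        by_cases hp : nb = parent
        · -- skipped neighbour
          rw [show dfsGoA adj fuel (nb :: rest) node parent vis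
              = dfsGoA adj fuel rest node parent vis by rw [dfsGoA, if_pos hp]]
          exact ihl node parent vis par (pre ++ [nb]) Hf hnode hvU hnd hparinv
            (by rw [hpre, List.append_assoc, List.singleton_append])
            (fun i hi h0 hmem => hskip i hi h0 (List.mem_cons_of_mem _ hmem)) hnp
        · by_cases hv : nb ∈ vis
          · -- would-be back edge: impossible in a tree
            exfalso
            apply pvNoBackEdge HT1 HT3 hparinv hnode hv hadjnb
            · intro i hi h0 hvi
              have := hskip i hi h0 (by rw [hvi]; exact List.mem_cons_self)
              rw [hvi] at this
              exact this
            · intro i hi h0 hvi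
              rcases hnp with hnp | hnp
              · rw [hnp]
                exact fun hh => hp hh.symm
              · -- node is the root at position 0; a second position contradicts Nodup
                exfalso
                have hv0 : vis[0]'(by omega) = node := by
                  cases vis with
                  | nil => simp at hi
                  | cons a t =>
                    have : a = node := by simpa using hnp
                    simpa using this
                have h00 : 0 < vis.length := by omega
                have : (0 : Nat) = i :=
                  (List.Nodup.getElem_inj_iff hnd).mp (by rw [hv0, hvi] : vis[0]'h00 = vis[i]'hi)
                omega
          · -- recurse into nb
            have hc : ¬ PySem.Set.contains vis nb = true := by
              rw [PySem.Set.contains_iff]; exact hv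
            have hnbU : nb ∈ U := (pvAdjRel_memU HPU hadjnb).2
            obtain ⟨new1, par1, k1, k2, k3, k4, k5, k6, k7, k8⟩ :=
              ih nb node vis par Hf hnbU hv hvU hnd hparinv (Or.inl ⟨hnode, hadjnb⟩)
            rw [show dfsGoA adj fuel (nb :: rest) node parent vis
                = dfsGoA adj fuel rest node parent (vis ++ new1) by
              rw [dfsGoA, if_neg hp, if_neg hc, k1]]
            have hdisj : ∀ x ∈ new1, x ∉ vis := pvNodupDisj k3
            have hnode1 : node ∉ new1 := fun h => hdisj node h hnode
            -- partners of node are nodup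
            have hpnodup : (pvPartners P node).Nodup := pvPartners_nodup HT1 HT2
            have hnbrest : nb ∉ rest := by
              have := hpre ▸ hpnodup
              rw [List.nodup_append] at this
              exact fun hmem => (List.nodup_cons.mp this.2.1).1 hmem
            have hcard1 : (U.filter (· ∉ (vis ++ new1 : List Int))).card < fuel := by
              have hsub : U.filter (· ∉ (vis ++ new1 : List Int)) ⊆ U.filter (· ∉ vis) := by
                intro x hx
                rw [Finset.mem_filter] at hx ⊢
                exact ⟨hx.1, fun hxv => hx.2 (List.mem_append.mpr (Or.inl hxv))⟩
              have := Finset.card_le_card hsub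
              omega
            obtain ⟨new2, par2, m1, m2, m3, m4, m5, m6⟩ :=
              ihl node parent (vis ++ new1) par1 (pre ++ [nb]) hcard1
                (List.mem_append.mpr (Or.inl hnode))
                (by intro x hx
                    rcases List.mem_append.mp hx with hx | hx
                    · exact hvU x hx
                    · exact k4 x hx)
                k3 k5
                (by rw [hpre, List.append_assoc, List.singleton_append])
                (by -- hskip for the extended visited list
                  intro i hi h0 hmem
                  by_cases hilt : i < vis.length
                  · have hgl : (vis ++ new1)[i]'hi = vis[i]'hilt := List.getElem_append_left hilt
                    rw [hgl] at hmem ⊢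
                    have hxvis : vis[i]'hilt ∈ vis := List.getElem_mem hilt
                    have hnin : vis[i]'hilt ∉ new1 := fun h => hdisj _ h hxvis
                    rw [k6 _ hnin]
                    exact hskip i hilt h0 (List.mem_cons_of_mem _ hmem)
                  · -- element of new1
                    have hge : vis.length ≤ i := le_of_not_gt hilt
                    have hxnew : (vis ++ new1)[i]'hi ∈ new1 := by
                      rw [List.getElem_append_right hge]
                      exact List.getElem_mem _
                    by_cases hxnb : (vis ++ new1)[i]'hi = nb
                    · rw [hxnb] at hmem
                      exact absurd hmem hnbrest
                    · have := k8 _ hxnew hxnb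
                      intro heq
                      rw [heq] at this
                      exact hnode1 this)
                (by rcases hnp with hnp | hnp
                    · left
                      rw [k6 node hnode1]
                      exact hnp
                    · right
                      rw [List.head?_append]
                      cases vis with
                      | nil => simp at hnode
                      | cons a t => simpa using hnp)
            refine ⟨new1 ++ new2, par2, ?_, ?_, ?_, ?_, ?_, ?_⟩
            · rw [m1, List.append_assoc]
            · rw [← List.append_assoc]
              exact m2
            · intro x hx
              rcases List.mem_append.mp hx with hx | hx
              · exact k4 x hx
              · exact m3 x hx
            · rw [← List.append_assoc]
              exact m4
            · intro x hx
              have hx1 : x ∉ new1 := fun h => hx (List.mem_append.mpr (Or.inl h))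
              have hx2 : x ∉ new2 := fun h => hx (List.mem_append.mpr (Or.inr h))
              rw [m5 x hx2, k6 x hx1]
            · intro u hu
              rcases List.mem_append.mp hu with hu | hu
              · have hu2 : u ∉ new2 :=
                  fun h => pvNodupDisj m2 u h (List.mem_append.mpr (Or.inr hu))
                rw [m5 u hu2]
                by_cases hun : u = nb
                · subst hun
                  left
                  exact k7
                · right
                  exact List.mem_append.mpr (Or.inl (k8 u hu hun))
              · rcases m6 u hu with h | h
                · exact Or.inl h
                · exact Or.inr (List.mem_append.mpr (Or.inr h))
    -- dfs at fuel+1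
    intro node parent vis par Hf hnU hnode hvU hnd hparinv hedge
    have hadd : PySem.Set.add vis node = vis ++ [node] := PySem.Set.add_of_not_mem hnode
    have hnd1 : (vis ++ [node] : List Int).Nodup := by
      rw [List.nodup_append]
      refine ⟨hnd, List.nodup_singleton node, ?_⟩
      intro a ha b hb
      rw [List.mem_singleton] at hb
      subst hb
      exact fun hab => hnode (hab ▸ ha)
    set par1 : Int → Int := fun x => if x = node then parent else par x with hpar1
    have hpar1node : par1 node = parent := by simp [hpar1]
    have hpar1old : ∀ x, x ≠ node → par1 x = par x := by
      intro x hx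
      simp [hpar1, hx]
    have hparinv1 : pvParInv P (vis ++ [node]) par1 := by
      intro i hi h0
      by_cases hilt : i < vis.length
      · have hgl : (vis ++ [node])[i]'hi = vis[i]'hilt := List.getElem_append_left hilt
        have hxvis : vis[i]'hilt ∈ vis := List.getElem_mem hilt
        have hxne : vis[i]'hilt ≠ node := fun h => hnode (h ▸ hxvis)
        rw [hgl, hpar1old _ hxne]
        obtain ⟨hmem, hadj⟩ := hparinv i hilt h0
        refine ⟨?_, hadj⟩
        rw [List.take_append_of_le_length (le_of_lt hilt)]
        exact hmem
      · have hieq : i = vis.length := by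
          simp only [List.length_append, List.length_cons, List.length_nil] at hi
          omega
        have hgl : (vis ++ [node])[i]'hi = node := List.getElem_concat_length hieq _
        rw [hgl, hpar1node]
        rcases hedge with ⟨hpv, hpadj⟩ | ⟨hvnil, _⟩
        · refine ⟨?_, hpadj⟩
          rw [List.take_append_of_le_length (le_of_eq hieq), hieq, List.take_length]
          exact hpv
        · exfalso
          rw [hvnil] at hieq
          simp at hieq
          omega
    have hfuel1 : (U.filter (· ∉ (vis ++ [node] : List Int))).card < fuel := by
      have hssub : U.filter (· ∉ (vis ++ [node] : List Int)) ⊂ U.filter (· ∉ vis) := by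
        constructor
        · intro x hx
          rw [Finset.mem_filter] at hx ⊢
          exact ⟨hx.1, fun hxv => hx.2 (List.mem_append.mpr (Or.inl hxv))⟩
        · intro hsup
          have hnf : node ∈ U.filter (· ∉ vis) := by
            rw [Finset.mem_filter]; exact ⟨hnU, hnode⟩
          have := hsup hnf
          rw [Finset.mem_filter] at this
          exact this.2 (List.mem_append.mpr (Or.inr (List.mem_singleton_self node)))
      have := Finset.card_lt_card hssub
      omega
    have hskip1 : ∀ i (hi : i < (vis ++ [node] : List Int).length), 0 < i →
        (vis ++ [node] : List Int)[i] ∈ adj.getD node [] → par1 (vis ++ [node] : List Int)[i] ≠ node := by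
      intro i hi h0 _
      by_cases hilt : i < vis.length
      · have hgl : (vis ++ [node])[i]'hi = vis[i]'hilt := List.getElem_append_left hilt
        have hxvis : vis[i]'hilt ∈ vis := List.getElem_mem hilt
        have hxne : vis[i]'hilt ≠ node := fun h => hnode (h ▸ hxvis)
        rw [hgl, hpar1old _ hxne]
        obtain ⟨hmem, _⟩ := hparinv i hilt h0
        intro heq
        apply hnode
        rw [← heq]
        exact List.mem_of_mem_take hmem
      · have hieq : i = vis.length := by
          simp only [List.length_append, List.length_cons, List.length_nil] at hi
          omega
        have hgl : (vis ++ [node])[i]'hi = node := List.getElem_concat_length hieq _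
        rw [hgl, hpar1node]
        rcases hedge with ⟨hpv, _⟩ | ⟨hvnil, _⟩
        · exact fun h => hnode (h ▸ hpv)
        · exfalso
          rw [hvnil] at hieq
          simp at hieq
          omega
    have hnp1 : par1 node = parent ∨ (vis ++ [node] : List Int).head? = some node := by
      rcases hedge with _ | ⟨hvnil, _⟩
      · exact Or.inl hpar1node
      · right
        rw [hvnil]
        rfl
    rw [show dfsA adj (fuel + 1) node parent vis
        = dfsGoA adj fuel (adj.getD node []) node parent (vis ++ [node]) by
      rw [dfsA, hadd]]
    obtain ⟨new', par2, g1, g2, g3, g4, g5, g6⟩ :=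
      go (adj.getD node []) node parent (vis ++ [node]) par1 [] hfuel1
        (List.mem_append.mpr (Or.inr (List.mem_singleton_self node)))
        (by intro x hx
            rcases List.mem_append.mp hx with hx | hx
            · exact hvU x hx
            · rw [List.mem_singleton] at hx
              exact hx ▸ hnU)
        hnd1 hparinv1 (by rw [Hadj, List.nil_append]) hskip1 hnp1
    have hnodenew' : node ∉ new' :=
      fun h => pvNodupDisj g2 node h (List.mem_append.mpr (Or.inr (List.mem_singleton_self node)))
    refine ⟨node :: new', par2, ?_, List.mem_cons_self, ?_, ?_, ?_, ?_, ?_, ?_⟩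
    · rw [g1, List.append_assoc, List.singleton_append]
    · rw [← List.singleton_append, ← List.append_assoc]
      exact g2
    · intro x hx
      rcases List.mem_cons.mp hx with rfl | hx
      · exact hnU
      · exact g3 x hx
    · rw [← List.singleton_append, ← List.append_assoc]
      exact g4
    · intro x hx
      have hx1 : x ≠ node := fun h => hx (h ▸ List.mem_cons_self)
      have hx2 : x ∉ new' := fun h => hx (List.mem_cons_of_mem _ h)
      rw [g5 x hx2, hpar1old x hx1]
    · rw [g5 node hnodenew', hpar1node]
    · intro u hu hun
      have hu' : u ∈ new' := by
        rcases List.mem_cons.mp hu with rfl | hu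
        · exact absurd rfl hun
        · exact hu
      rcases g6 u hu' with h | h
      · rw [h]; exact List.mem_cons_self
      · exact List.mem_cons_of_mem _ h

-- ===== GLUE =====
-- bridging the ports to the graph model

theorem pvAdj_getD (edges : List (List Int)) (x : Int) :
    (pvAdjA edges).getD x [] = pvPartners (pvPairs edges) x := by
  unfold pvAdjA
  rw [pvAdjA_foldl]
  simp [PySem.Dict.getD_empty]

theorem pvPairs_length {edges : List (List Int)} (h : ∀ e ∈ edges, e.length = 2) :
    (pvPairs edges).length = edges.length := by
  induction edges with
  | nil => rfl
  | cons e es ih =>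
    obtain ⟨a, b, rfl⟩ := List.length_eq_two.mp (h e List.mem_cons_self)
    have := ih (fun e' he' => h e' (List.mem_cons_of_mem _ he'))
    simp [pvPairs] at this ⊢
    exact this

theorem pvReachU {P : List (Int × Int)} {U : Finset Int}
    (HPU : ∀ e ∈ P, e.1 ∈ U ∧ e.2 ∈ U) (h0 : (0 : Int) ∈ U) {x : Int}
    (h : pvReach P 0 x) : x ∈ U := by
  induction h with
  | refl => exact h0
  | tail _ hadj _ => exact (pvAdjRel_memU HPU hadj).2

-- the verdict proof
theorem pvMainEq (n : Int) (edges : List (List Int))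
    (hpre : Pre_validTree_dfs n edges) :
    validTree_dfs n edges = validTree_dfs_alt n edges := by
  by_cases hg : (edges.length : Int) = n - 1
  case neg =>
    rw [validTree_dfs, validTree_dfs_alt, if_pos hg, if_pos hg]
  case pos =>
    have hwf := hpre hg
    have hA : validTree_dfs n edges =
        ((dfsA (pvAdjA edges) (2 * edges.length + 2) 0 (-1) PySem.Set.empty).1 &&
          decide (((dfsA (pvAdjA edges) (2 * edges.length + 2) 0 (-1) PySem.Set.empty).2.length : Int) = n)) := by
      rw [validTree_dfs, if_neg (not_not_intro hg)]
    have hB : validTree_dfs_alt n edges =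
        decide (((bfsB (pvAdjA edges) (2 * edges.length + 2) [0] (PySem.Set.ofList [0])).length : Int) = n) := by
      rw [validTree_dfs_alt, if_neg (not_not_intro hg)]
      rfl
    set P := pvPairs edges with hP
    set U : Finset Int := Finset.Icc 0 (n - 1) with hU
    have hlen2 : ∀ e ∈ edges, e.length = 2 := fun e he => (hwf e he).1
    have hPlen : P.length = edges.length := pvPairs_length hlen2
    have hn1 : n = (edges.length : Int) + 1 := by omega
    have hnpos : (1 : Int) ≤ n := by omega
    have hUcard : U.card = P.length + 1 := by
      rw [hU, Int.card_Icc, hPlen]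
      omega
    have h0U : (0 : Int) ∈ U := by
      rw [hU, Finset.mem_Icc]
      omega
    have HPU : ∀ e ∈ P, e.1 ∈ U ∧ e.2 ∈ U := by
      intro e he
      rw [hP] at he
      unfold pvPairs at he
      rw [List.mem_filterMap] at he
      obtain ⟨l, hl, hmatch⟩ := he
      match l, hmatch with
      | [u, v], hmatch =>
        have he' : e = (u, v) := by simpa using hmatch.symm
        have hb := (hwf _ hl).2
        have hu := hb u (by simp)
        have hv := hb v (by simp)
        subst he'
        constructor <;> rw [hU, Finset.mem_Icc] <;> simp <;> omega
    have Hadj : ∀ y, (pvAdjA edges).getD y [] = pvPartners P y := fun y => pvAdj_getD edges y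
    -- run the BFS
    have hofl : PySem.Set.ofList [(0 : Int)] = [0] := by decide
    obtain ⟨hbNd, hbSub, hbSound, hbClosed⟩ :=
      pvBfsMain (pvAdjA edges) P U 0 Hadj HPU (2 * edges.length + 2) [0] [0]
        (by
          have hsub : U.filter (· ∉ ([0] : List Int)) ⊆ U.erase 0 := by
            intro x hx
            rw [Finset.mem_filter] at hx
            rw [Finset.mem_erase]
            exact ⟨by simpa using hx.2, hx.1⟩
          have h1 := Finset.card_le_card hsub
          have h2 := Finset.card_erase_of_mem h0U
          rw [hUcard, hPlen] at h2
          simp only [List.length_cons, List.length_nil]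
          omega)
        (fun x hx => hx) (List.nodup_singleton 0)
        (by intro x hx
            rw [List.mem_singleton] at hx
            subst hx
            exact pvReach_refl)
        (by intro x hx hx'
            exact absurd hx hx')
    set seen := bfsB (pvAdjA edges) (2 * edges.length + 2) [0] [0] with hseen
    have hseenChar : ∀ x, x ∈ seen ↔ pvReach P 0 x := by
      intro x
      constructor
      · exact hbSound x
      · intro hr
        induction hr with
        | refl => exact hbSub 0 (List.mem_singleton_self 0)
        | tail _ hadj ih => exact hbClosed _ ih _ hadj
    rw [hA, hB, hofl, ← hseen]
    -- run the DFS (soundness side, no assumptions)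
    obtain ⟨new, hd1, hd2, hd3, hd4⟩ :=
      pvDfsSound (pvAdjA edges) P Hadj (2 * edges.length + 2) 0 (-1) PySem.Set.empty
        List.nodup_nil (by simp [PySem.Set.empty])
    have hd1' : (dfsA (pvAdjA edges) (2 * edges.length + 2) 0 (-1) PySem.Set.empty).2 = new := by
      simpa [PySem.Set.empty] using hd1
    cases hok : (dfsA (pvAdjA edges) (2 * edges.length + 2) 0 (-1) PySem.Set.empty).1 with
    | true =>
      -- visited set is exactly the reachable set: same card as seen
      obtain ⟨hd5, hd6, hd7⟩ := hd4 hok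
      have hvisChar : ∀ x, x ∈ new ↔ pvReach P 0 x := by
        intro x
        constructor
        · intro hx
          exact hd3 x hx
        · intro hr
          induction hr with
          | refl => exact hd5
          | @tail b c _ hadj ih =>
            by_cases hb0 : b = 0
            · subst hb0
              rcases hd6 c hadj with h | h
              · simpa [PySem.Set.empty] using h
              · exfalso
                have hcU : c ∈ U := (pvAdjRel_memU HPU hadj).2
                rw [h, hU, Finset.mem_Icc] at hcU
                omega
            · have := hd7 b ih hb0 c hadj
              simpa [PySem.Set.empty] using this
      have hperm : seen.Perm new := by
        rw [List.perm_ext_iff_of_nodup hbNd (by simpa [PySem.Set.empty] using hd2)]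
        intro x
        rw [hseenChar x, hvisChar x]
      rw [hd1', Bool.true_and, hperm.length_eq]
    | false =>
      -- if all n vertices were reachable, the DFS could not have failed
      rw [Bool.false_and]
      symm
      rw [decide_eq_false_iff_not]
      intro hlen
      have hseenU : ∀ x ∈ seen, x ∈ U := fun x hx => pvReachU HPU h0U (hbSound x hx)
      have htf : seen.toFinset = U := by
        apply Finset.eq_of_subset_of_card_le
        · intro x hx
          rw [List.mem_toFinset] at hx
          exact hseenU x hx
        · rw [List.toFinset_card_of_nodup hbNd, hUcard, hPlen]
          omega
      have hconn : ∀ x ∈ U, pvReach P 0 x := by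
        intro x hx
        rw [← htf, List.mem_toFinset] at hx
        exact hbSound x hx
      have HT1 := pvT1 hconn hUcard
      have HT2 := pvT2 hconn hUcard
      have HT3 : ∀ l1 (e : Int × Int) l2, P = l1 ++ e :: l2 → ¬ pvReach (l1 ++ l2) e.1 e.2 :=
        fun l1 e l2 hs => pvT3 hconn hUcard hs
      obtain ⟨new', par', hm1, _⟩ :=
        pvDfsMain (pvAdjA edges) P U Hadj HPU HT1 HT2 HT3 (2 * edges.length + 2) 0 (-1) []
          (fun _ => 0)
          (by
            have hft : U.filter (· ∉ ([] : List Int)) = U := by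
              apply Finset.filter_true_of_mem
              intro x _
              simp
            rw [hft, hUcard, hPlen]
            omega)
          h0U (by simp) (by simp) List.nodup_nil
          (by intro i hi h0; simp at hi)
          (Or.inr ⟨rfl, by
            intro w hw hweq
            have hwU : w ∈ U := (pvAdjRel_memU HPU hw).2
            rw [hU, Finset.mem_Icc] at hwU
            omega⟩)
      have hfst : (dfsA (pvAdjA edges) (2 * edges.length + 2) 0 (-1) PySem.Set.empty).1 = true := by
        rw [show (PySem.Set.empty : PySem.Set Int) = ([] : List Int) from rfl, hm1]
      rw [hok] at hfst
      simp at hfst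

-- ===== VERDICT (by name: the statement is the Claim_ definition above) =====
theorem validTree_dfs_spec : Claim_equal_validTree_dfs := by
  intro n edges _ hpre
  unfold Spec_validTree_dfs
  exact pvMainEq n edges hpre
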